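-- pv_equiv track=rewrite | github.com/tgillet1/PASTA | sequence.py | generate_identity_matrix
-- ===== SOURCE A (Python) =====
-- default_nodetypes = {'A':'A','C':'C','T':'T'}
--
-- def generate_identity_matrix(nodetypes=default_nodetypes):
--     submat = {}
--     ac_types = ['A','C']
--     for char1 in nodetypes.keys():
--         nodetype1 = nodetypes[char1]
--         for char2 in nodetypes.keys():
--             nodetype2 = nodetypes[char2]
--             if nodetype1 == nodetype2 or nodetype1 in ac_types and nodetype2 in ac_types:
--                 submat[(char1,char2)] = 1
--                 submat[(char2,char1)] = 1
--             else:
--                 submat[(char1,char2)] = -40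
--                 submat[(char2,char1)] = -40
--     return submat
-- ===== SOURCE B (Python) =====
-- default_nodetypes = {'A':'A','C':'C','T':'T'}
--
-- def generate_identity_matrix(nodetypes=default_nodetypes):
--     # canonical class per char: 'A' and 'C' nodetypes share one class, any other nodetype is its own class
--     cls = {c: ('A' if t in ('A', 'C') else t) for c, t in nodetypes.items()}
--     submat = {}
--     rest = list(cls)
--     while rest:
--         c1, rest = rest[0], rest[1:]
--         submat[(c1, c1)] = 1
--         for c2 in rest:
--             score = 1 if cls[c1] == cls[c2] else -40
--             submat[(c1, c2)] = score
--             submat[(c2, c1)] = score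
--     return submat
-- ===== Notes on version B (the rewrite author's own statement) =====
-- stated objective: simpler
-- what changed: B precomputes a canonical class table (nodetypes 'A'/'C' collapse to one class) and then fills the matrix in a single triangular pass that writes each symmetric pair once, instead of A's full square loop that re-tests the compound condition and redundantly double-writes every pair twice.
import Mathlib
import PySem

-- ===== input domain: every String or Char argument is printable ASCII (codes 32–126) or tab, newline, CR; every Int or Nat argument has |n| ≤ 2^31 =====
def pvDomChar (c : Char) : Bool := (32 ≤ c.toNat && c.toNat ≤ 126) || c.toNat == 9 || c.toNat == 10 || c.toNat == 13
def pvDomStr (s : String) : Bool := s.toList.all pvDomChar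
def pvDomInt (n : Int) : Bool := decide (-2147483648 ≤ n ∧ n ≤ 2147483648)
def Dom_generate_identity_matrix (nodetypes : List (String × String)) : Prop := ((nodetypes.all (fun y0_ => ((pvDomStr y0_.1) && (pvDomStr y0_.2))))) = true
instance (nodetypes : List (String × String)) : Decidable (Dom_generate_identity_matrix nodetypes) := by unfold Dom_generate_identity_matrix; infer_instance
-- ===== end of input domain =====

-- B replaces A's full square loop with redundant symmetric double-writes by a precomputed
-- class table plus one triangular pass writing each symmetric pair once (simpler; same dict,
-- same insertion order).

-- ===== PORT A =====
-- literal port of A: nodetypes[c] is exact as getD c "" because c always comes from nodetypes.keys()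
def generate_identity_matrix (nodetypes : List (String × String)) : List (String × String × Int) :=
  let d := PySem.Dict.ofList nodetypes
  let ac_types : List String := ["A", "C"]
  (d.keys.foldl (fun submat char1 =>
      let nodetype1 := d.getD char1 ""
      d.keys.foldl (fun submat char2 =>
          let nodetype2 := d.getD char2 ""
          if nodetype1 = nodetype2 ∨ (nodetype1 ∈ ac_types ∧ nodetype2 ∈ ac_types) then
            (submat.insert (char1, char2) 1).insert (char2, char1) 1
          else
            (submat.insert (char1, char2) (-40)).insert (char2, char1) (-40))
        submat)
    (PySem.Dict.empty)).items.map (fun p => (p.1.1, p.1.2, p.2))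

-- ===== PORT B =====
-- 'A' if t in ('A', 'C') else t
def pvClsVal (t : String) : String := if t = "A" ∨ t = "C" then "A" else t

-- the 'while rest:' loop of Source B, peeling rest[0] each round
def pvTriLoop (cls : PySem.Dict String String) :
    List String → PySem.Dict (String × String) Int → PySem.Dict (String × String) Int
  | [], submat => submat
  | c1 :: rest, submat =>
      pvTriLoop cls rest
        (rest.foldl (fun m c2 =>
            let score : Int := if cls.getD c1 "" = cls.getD c2 "" then 1 else -40
            (m.insert (c1, c2) score).insert (c2, c1) score)
          (submat.insert (c1, c1) 1))

def generate_identity_matrix_alt (nodetypes : List (String × String)) : List (String × String × Int) :=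
  let cls := (PySem.Dict.ofList nodetypes).items.foldl
      (fun m p => m.insert p.1 (pvClsVal p.2)) PySem.Dict.empty
  (pvTriLoop cls cls.keys PySem.Dict.empty).items.map (fun p => (p.1.1, p.1.2, p.2))

-- ===== PRECONDITION & SPEC =====
def Spec_generate_identity_matrix (nodetypes : List (String × String)) (out : List (String × String × Int)) : Prop := out = generate_identity_matrix_alt nodetypes
instance (nodetypes : List (String × String)) (out : List (String × String × Int)) : Decidable (Spec_generate_identity_matrix nodetypes out) := by unfold Spec_generate_identity_matrix; infer_instance

-- ===== CLAIM (what is proved, stated in full; the proofs are below) =====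
def Claim_equal_generate_identity_matrix : Prop := ∀ (nodetypes : List (String × String)), Dom_generate_identity_matrix nodetypes → Spec_generate_identity_matrix nodetypes (generate_identity_matrix nodetypes)

-- ===== LEMMAS AND PROOFS =====

-- the dict parameter as a PySem.Dict, and B's class table
def pvD (nodetypes : List (String × String)) : PySem.Dict String String :=
  PySem.Dict.ofList nodetypes

def pvCls (nodetypes : List (String × String)) : PySem.Dict String String :=
  (pvD nodetypes).items.foldl (fun m p => m.insert p.1 (pvClsVal p.2)) PySem.Dict.empty

-- the two programs' score functions
def pvScA (d : PySem.Dict String String) (c1 c2 : String) : Int :=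
  if d.getD c1 "" = d.getD c2 "" ∨ (d.getD c1 "" ∈ (["A", "C"] : List String) ∧ d.getD c2 "" ∈ (["A", "C"] : List String)) then 1 else -40

def pvScB (cls : PySem.Dict String String) (c1 c2 : String) : Int :=
  if cls.getD c1 "" = cls.getD c2 "" then 1 else -40

-- one symmetric double-write, abstracted over the score function
def pvRowIns (sc : String → String → Int) (c1 : String)
    (m : PySem.Dict (String × String) Int) (c2 : String) : PySem.Dict (String × String) Int :=
  (m.insert (c1, c2) (sc c1 c2)).insert (c2, c1) (sc c1 c2)

-- the canonical items list both programs produce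
def pvL (sc : String → String → Int) : List String → List ((String × String) × Int)
  | [] => []
  | k :: ks => (((k, k), sc k k) ::
      ks.flatMap (fun r => [((k, r), sc k r), ((r, k), sc k r)])) ++ pvL sc ks

theorem pv_insert_eq_self {κ ν : Type} [BEq κ] [LawfulBEq κ]
    (d : PySem.Dict κ ν) (k : κ) (v : ν) (hnd : d.keys.Nodup) (h : d.get? k = some v) :
    d.insert k v = d := by
  have hc : d.contains k = true := by rw [PySem.Dict.contains_eq_isSome_get?, h]; rfl
  apply PySem.Dict.ext
  rw [PySem.Dict.items_insert_of_contains d v hc]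
  have hfix : ∀ l : List (κ × ν), (∀ p ∈ l, (p.1 == k) = true → p = (k, v)) →
      l.map (fun p => if (p.1 == k) = true then (k, v) else p) = l := by
    intro l hl
    induction l with
    | nil => rfl
    | cons a t ih =>
      rw [List.map_cons, ih (fun p hp => hl p (List.mem_cons_of_mem _ hp))]
      by_cases hak : (a.1 == k) = true
      · rw [if_pos hak, hl a (List.mem_cons_self) hak]
      · rw [if_neg hak]
  apply hfix
  rintro ⟨a, b⟩ hp hak
  have hak' : a = k := by simpa using hak
  subst hak'
  have hget := PySem.Dict.get?_of_mem_items d hp hnd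
  rw [h] at hget
  have hbv : v = b := by simpa using hget
  rw [hbv]

theorem pv_notmem_contains {κ ν : Type} [BEq κ] [LawfulBEq κ]
    (d : PySem.Dict κ ν) (k : κ) (h : k ∉ d.keys) : d.contains k = false := by
  rw [← Bool.not_eq_true, PySem.Dict.contains_iff_mem_keys]; exact h

theorem pv_row_items (sc : String → String → Int) (c1 : String) :
    ∀ (ks : List String) (m : PySem.Dict (String × String) Int),
      m.keys.Nodup → c1 ∉ ks → ks.Nodup →
      (∀ r ∈ ks, (c1, r) ∉ m.keys ∧ (r, c1) ∉ m.keys) →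
      (ks.foldl (pvRowIns sc c1) m).items
        = m.items ++ ks.flatMap (fun r => [((c1, r), sc c1 r), ((r, c1), sc c1 r)])
  | [], m, _, _, _, _ => by simp
  | r :: ks, m, hnd, hc1, hksnd, hfresh => by
    have hrc1 : c1 ≠ r := fun h => hc1 (h ▸ List.mem_cons_self)
    have h1 : m.contains (c1, r) = false :=
      pv_notmem_contains _ _ (hfresh r (List.mem_cons_self)).1
    have hi1 : (m.insert (c1, r) (sc c1 r)).items = m.items ++ [((c1, r), sc c1 r)] :=
      PySem.Dict.items_insert_of_not_contains m _ h1
    have hk1 : (m.insert (c1, r) (sc c1 r)).keys = m.keys ++ [(c1, r)] := by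
      show (m.insert (c1, r) (sc c1 r)).items.map Prod.fst = m.items.map Prod.fst ++ [(c1, r)]
      rw [hi1, List.map_append]; rfl
    have h2 : (m.insert (c1, r) (sc c1 r)).contains (r, c1) = false := by
      apply pv_notmem_contains
      rw [hk1]
      intro hmem
      rcases List.mem_append.1 hmem with hmem | hmem
      · exact (hfresh r (List.mem_cons_self)).2 hmem
      · simp only [List.mem_singleton, Prod.mk.injEq] at hmem
        exact hrc1 hmem.2
    have hm' := PySem.Dict.items_insert_of_not_contains (m.insert (c1, r) (sc c1 r)) (sc c1 r) h2
    have hk2 : ((m.insert (c1, r) (sc c1 r)).insert (r, c1) (sc c1 r)).keys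
        = m.keys ++ [(c1, r), (r, c1)] := by
      show ((m.insert (c1, r) (sc c1 r)).insert (r, c1) (sc c1 r)).items.map Prod.fst
        = m.items.map Prod.fst ++ [(c1, r), (r, c1)]
      rw [hm', hi1]
      simp [List.map_append]
    have hnd' : ((m.insert (c1, r) (sc c1 r)).insert (r, c1) (sc c1 r)).keys.Nodup :=
      PySem.Dict.nodup_keys_insert _ _ _ (PySem.Dict.nodup_keys_insert _ _ _ hnd)
    have hrest := pv_row_items sc c1 ks ((m.insert (c1, r) (sc c1 r)).insert (r, c1) (sc c1 r))
      hnd' (fun h => hc1 (List.mem_cons_of_mem _ h)) hksnd.of_cons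
      (by
        intro r' hr'
        have hrr' : r' ≠ r := fun h => (List.nodup_cons.1 hksnd).1 (h ▸ hr')
        have hr'c1 : c1 ≠ r' := fun h => hc1 (h ▸ List.mem_cons_of_mem _ hr')
        constructor <;> rw [hk2] <;> intro hmem <;> rcases List.mem_append.1 hmem with hmem | hmem
        · exact (hfresh r' (List.mem_cons_of_mem _ hr')).1 hmem
        · simp only [List.mem_cons, List.not_mem_nil, or_false] at hmem
          rcases hmem with h | h
          · injection h with ha hb; exact hrr' hb
          · injection h with ha hb; exact hrc1 ha
        · exact (hfresh r' (List.mem_cons_of_mem _ hr')).2 hmem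
        · simp only [List.mem_cons, List.not_mem_nil, or_false] at hmem
          rcases hmem with h | h
          · injection h with ha hb; exact hr'c1 ha.symm
          · injection h with ha hb; exact hrr' ha)
    show (ks.foldl (pvRowIns sc c1) (pvRowIns sc c1 m r)).items
      = m.items ++ (r :: ks).flatMap (fun r => [((c1, r), sc c1 r), ((r, c1), sc c1 r)])
    have hstep : pvRowIns sc c1 m r = (m.insert (c1, r) (sc c1 r)).insert (r, c1) (sc c1 r) := rfl
    rw [hstep, hrest, hm', hi1]
    simp [List.flatMap_cons, List.append_assoc]

theorem pv_row_get?_of_ne (sc : String → String → Int) (c1 : String) :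
    ∀ (ks : List String) (m : PySem.Dict (String × String) Int) (q : String × String),
      (∀ r ∈ ks, q ≠ (c1, r) ∧ q ≠ (r, c1)) →
      (ks.foldl (pvRowIns sc c1) m).get? q = m.get? q
  | [], _, _, _ => rfl
  | r :: ks, m, q, hq => by
    show (ks.foldl (pvRowIns sc c1) (pvRowIns sc c1 m r)).get? q = m.get? q
    rw [pv_row_get?_of_ne sc c1 ks (pvRowIns sc c1 m r) q
      (fun r' hr' => hq r' (List.mem_cons_of_mem _ hr'))]
    show ((m.insert (c1, r) (sc c1 r)).insert (r, c1) (sc c1 r)).get? q = m.get? q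
    rw [PySem.Dict.get?_insert_of_ne _ _ (hq r (List.mem_cons_self)).2,
      PySem.Dict.get?_insert_of_ne _ _ (hq r (List.mem_cons_self)).1]

theorem pv_row_nodup (sc : String → String → Int) (c1 : String) :
    ∀ (ks : List String) (m : PySem.Dict (String × String) Int),
      m.keys.Nodup → (ks.foldl (pvRowIns sc c1) m).keys.Nodup
  | [], _, hnd => hnd
  | r :: ks, m, hnd => by
    show (ks.foldl (pvRowIns sc c1) (pvRowIns sc c1 m r)).keys.Nodup
    exact pv_row_nodup sc c1 ks _
      (PySem.Dict.nodup_keys_insert _ _ _ (PySem.Dict.nodup_keys_insert _ _ _ hnd))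

theorem pv_skip_fold (sc : String → String → Int) (k : String) (ks : List String) :
    ∀ (l : List String), (∀ c ∈ l, c ∈ ks) → k ∉ ks →
    ∀ (m : PySem.Dict (String × String) Int), m.keys.Nodup →
      (∀ c ∈ ks, m.get? (c, k) = some (sc c k) ∧ m.get? (k, c) = some (sc c k)) →
      l.foldl (fun m c1 => (k :: ks).foldl (pvRowIns sc c1) m) m
        = l.foldl (fun m c1 => ks.foldl (pvRowIns sc c1) m) m
  | [], _, _, _, _, _ => rfl
  | c :: l', hl, hk, m, hnd, hinv => by
    have hck : c ∈ ks := hl c (List.mem_cons_self)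
    have hrow : pvRowIns sc c m k = m := by
      show (m.insert (c, k) (sc c k)).insert (k, c) (sc c k) = m
      rw [pv_insert_eq_self m (c, k) (sc c k) hnd (hinv c hck).1]
      exact pv_insert_eq_self m (k, c) (sc c k) hnd (hinv c hck).2
    show l'.foldl (fun m c1 => (k :: ks).foldl (pvRowIns sc c1) m)
        (ks.foldl (pvRowIns sc c) (pvRowIns sc c m k))
      = l'.foldl (fun m c1 => ks.foldl (pvRowIns sc c1) m) (ks.foldl (pvRowIns sc c) m)
    rw [hrow]
    exact pv_skip_fold sc k ks l' (fun x hx => hl x (List.mem_cons_of_mem _ hx)) hk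
      (ks.foldl (pvRowIns sc c) m) (pv_row_nodup sc c ks m hnd)
      (by
        intro c' hc'
        have hne1 : ∀ r ∈ ks, ((c', k) : String × String) ≠ (c, r)
            ∧ ((c', k) : String × String) ≠ (r, c) := by
          intro r hr
          constructor <;> intro h <;> injection h with h1 h2
          · exact hk (by rw [h2]; exact hr)
          · exact hk (by rw [h2]; exact hck)
        have hne2 : ∀ r ∈ ks, ((k, c') : String × String) ≠ (c, r)
            ∧ ((k, c') : String × String) ≠ (r, c) := by
          intro r hr
          constructor <;> intro h <;> injection h with h1 h2
          · exact hk (by rw [h1]; exact hck)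
          · exact hk (by rw [h1]; exact hr)
        constructor
        · rw [pv_row_get?_of_ne sc c ks m (c', k) hne1]; exact (hinv c' hc').1
        · rw [pv_row_get?_of_ne sc c ks m (k, c') hne2]; exact (hinv c' hc').2)

-- freshness of all ks × ks pairs after the head row has been written
theorem pv_fresh_after_row (sc : String → String → Int) (k : String) (ks : List String)
    (m : PySem.Dict (String × String) Int) (v0 : Int)
    (hitems : (ks.foldl (pvRowIns sc k) (m.insert (k, k) v0)).items
      = (m.items ++ [((k, k), v0)]) ++ ks.flatMap (fun r => [((k, r), sc k r), ((r, k), sc k r)]))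
    (hkks : k ∉ ks)
    (hfresh : ∀ c1 ∈ (k :: ks), ∀ c2 ∈ (k :: ks), (c1, c2) ∉ m.keys) :
    ∀ c1 ∈ ks, ∀ c2 ∈ ks, (c1, c2) ∉ (ks.foldl (pvRowIns sc k) (m.insert (k, k) v0)).keys := by
  intro c1 hc1 c2 hc2 hmem
  have hc1k : c1 ≠ k := fun h => hkks (h ▸ hc1)
  have hc2k : c2 ≠ k := fun h => hkks (h ▸ hc2)
  have hmem' : (c1, c2) ∈ ((m.items ++ [((k, k), v0)])
      ++ ks.flatMap (fun r => [((k, r), sc k r), ((r, k), sc k r)])).map Prod.fst := by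
    rw [← hitems]; exact hmem
  rw [List.map_append, List.map_append] at hmem'
  rcases List.mem_append.1 hmem' with h | h
  · rcases List.mem_append.1 h with h | h
    · exact hfresh c1 (List.mem_cons_of_mem _ hc1) c2 (List.mem_cons_of_mem _ hc2) h
    · simp only [List.map_cons, List.map_nil, List.mem_singleton] at h
      exact hc1k (congrArg Prod.fst h)
  · rcases List.mem_map.1 h with ⟨p, hp, hfst⟩
    rcases List.mem_flatMap.1 hp with ⟨r, hr, hpr⟩
    simp only [List.mem_cons, List.not_mem_nil, or_false] at hpr
    rcases hpr with rfl | rfl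
    · injection hfst with hq1 hq2
      exact hc1k hq1.symm
    · injection hfst with hq1 hq2
      exact hc2k hq2.symm

-- after the head row, every (c,k) and (k,c) binding holds the symmetric score
theorem pv_inv_after_row (sc : String → String → Int) (hsym : ∀ a b, sc a b = sc b a)
    (k : String) (ks : List String) (m : PySem.Dict (String × String) Int)
    (hitems : (ks.foldl (pvRowIns sc k) (m.insert (k, k) (sc k k))).items
      = (m.items ++ [((k, k), sc k k)])
        ++ ks.flatMap (fun r => [((k, r), sc k r), ((r, k), sc k r)]))
    (hnd1 : (ks.foldl (pvRowIns sc k) (m.insert (k, k) (sc k k))).keys.Nodup) :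
    ∀ c ∈ ks, (ks.foldl (pvRowIns sc k) (m.insert (k, k) (sc k k))).get? (c, k) = some (sc c k)
      ∧ (ks.foldl (pvRowIns sc k) (m.insert (k, k) (sc k k))).get? (k, c) = some (sc c k) := by
  intro c hc
  have hm1 : ((c, k), sc k c) ∈ (ks.foldl (pvRowIns sc k) (m.insert (k, k) (sc k k))).items := by
    rw [hitems]
    exact List.mem_append.2 (Or.inr (List.mem_flatMap.2 ⟨c, hc, by simp⟩))
  have hm2 : ((k, c), sc k c) ∈ (ks.foldl (pvRowIns sc k) (m.insert (k, k) (sc k k))).items := by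
    rw [hitems]
    exact List.mem_append.2 (Or.inr (List.mem_flatMap.2 ⟨c, hc, by simp⟩))
  constructor
  · rw [hsym c k]; exact PySem.Dict.get?_of_mem_items _ hm1 hnd1
  · rw [hsym c k]; exact PySem.Dict.get?_of_mem_items _ hm2 hnd1

theorem pv_sq_items (sc : String → String → Int) (hsym : ∀ a b, sc a b = sc b a) :
    ∀ (ks : List String), ks.Nodup →
    ∀ (m : PySem.Dict (String × String) Int), m.keys.Nodup →
      (∀ c1 ∈ ks, ∀ c2 ∈ ks, (c1, c2) ∉ m.keys) →
      (ks.foldl (fun m c1 => ks.foldl (pvRowIns sc c1) m) m).items = m.items ++ pvL sc ks := by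
  intro ks
  induction ks with
  | nil => intro _ m _ _; simp [pvL]
  | cons k ks ih =>
    intro hnd m hmnd hfresh
    have hkks : k ∉ ks := (List.nodup_cons.1 hnd).1
    have hksnd : ks.Nodup := (List.nodup_cons.1 hnd).2
    have hkk : (k, k) ∉ m.keys := hfresh k (List.mem_cons_self) k (List.mem_cons_self)
    have hi0 : (m.insert (k, k) (sc k k)).items = m.items ++ [((k, k), sc k k)] :=
      PySem.Dict.items_insert_of_not_contains m _ (pv_notmem_contains _ _ hkk)
    have hk0 : (m.insert (k, k) (sc k k)).keys = m.keys ++ [(k, k)] := by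
      show (m.insert (k, k) (sc k k)).items.map Prod.fst = m.items.map Prod.fst ++ [(k, k)]
      rw [hi0, List.map_append]; rfl
    have hnd0 : (m.insert (k, k) (sc k k)).keys.Nodup := PySem.Dict.nodup_keys_insert m _ _ hmnd
    have hfresh0 : ∀ r ∈ ks, (k, r) ∉ (m.insert (k, k) (sc k k)).keys
        ∧ (r, k) ∉ (m.insert (k, k) (sc k k)).keys := by
      intro r hr
      have hrk : r ≠ k := fun h => hkks (h ▸ hr)
      constructor <;> rw [hk0] <;> intro hmem <;> rcases List.mem_append.1 hmem with hmem | hmem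
      · exact hfresh k (List.mem_cons_self) r (List.mem_cons_of_mem _ hr) hmem
      · simp only [List.mem_singleton] at hmem
        injection hmem with ha hb; exact hrk hb
      · exact hfresh r (List.mem_cons_of_mem _ hr) k (List.mem_cons_self) hmem
      · simp only [List.mem_singleton] at hmem
        injection hmem with ha hb; exact hrk ha
    have hrow := pv_row_items sc k ks (m.insert (k, k) (sc k k)) hnd0 hkks hksnd hfresh0
    have hitems' : (ks.foldl (pvRowIns sc k) (m.insert (k, k) (sc k k))).items
        = (m.items ++ [((k, k), sc k k)])
          ++ ks.flatMap (fun r => [((k, r), sc k r), ((r, k), sc k r)]) := by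
      rw [hrow, hi0]
    have hnd1 := pv_row_nodup sc k ks _ hnd0
    show (ks.foldl (fun m c1 => (k :: ks).foldl (pvRowIns sc c1) m)
        ((k :: ks).foldl (pvRowIns sc k) m)).items = m.items ++ pvL sc (k :: ks)
    rw [show (k :: ks).foldl (pvRowIns sc k) m
        = ks.foldl (pvRowIns sc k) (m.insert (k, k) (sc k k)) from by
      show ks.foldl (pvRowIns sc k) (pvRowIns sc k m k)
        = ks.foldl (pvRowIns sc k) (m.insert (k, k) (sc k k))
      exact congrArg (fun init => ks.foldl (pvRowIns sc k) init)
        (PySem.Dict.insert_insert_self m (k, k) (sc k k) (sc k k))]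
    rw [pv_skip_fold sc k ks ks (fun c hc => hc) hkks _ hnd1
      (pv_inv_after_row sc hsym k ks m hitems' hnd1)]
    rw [ih hksnd _ hnd1 (pv_fresh_after_row sc k ks m (sc k k) hitems' hkks hfresh)]
    rw [hitems']
    simp [pvL, List.append_assoc]

theorem pv_tri_items (cls : PySem.Dict String String) :
    ∀ (ks : List String), ks.Nodup →
    ∀ (m : PySem.Dict (String × String) Int), m.keys.Nodup →
      (∀ c1 ∈ ks, ∀ c2 ∈ ks, (c1, c2) ∉ m.keys) →
      (pvTriLoop cls ks m).items = m.items ++ pvL (pvScB cls) ks := by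
  intro ks
  induction ks with
  | nil => intro _ m _ _; simp [pvTriLoop, pvL]
  | cons k ks ih =>
    intro hnd m hmnd hfresh
    have hkks : k ∉ ks := (List.nodup_cons.1 hnd).1
    have hksnd : ks.Nodup := (List.nodup_cons.1 hnd).2
    have hkk : (k, k) ∉ m.keys := hfresh k (List.mem_cons_self) k (List.mem_cons_self)
    have hskk : pvScB cls k k = 1 := by simp [pvScB]
    have hi0 : (m.insert (k, k) (1 : Int)).items = m.items ++ [((k, k), (1 : Int))] :=
      PySem.Dict.items_insert_of_not_contains m _ (pv_notmem_contains _ _ hkk)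
    have hk0 : (m.insert (k, k) (1 : Int)).keys = m.keys ++ [(k, k)] := by
      show (m.insert (k, k) (1 : Int)).items.map Prod.fst = m.items.map Prod.fst ++ [(k, k)]
      rw [hi0, List.map_append]; rfl
    have hnd0 : (m.insert (k, k) (1 : Int)).keys.Nodup := PySem.Dict.nodup_keys_insert m _ _ hmnd
    have hfresh0 : ∀ r ∈ ks, (k, r) ∉ (m.insert (k, k) (1 : Int)).keys
        ∧ (r, k) ∉ (m.insert (k, k) (1 : Int)).keys := by
      intro r hr
      have hrk : r ≠ k := fun h => hkks (h ▸ hr)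
      constructor <;> rw [hk0] <;> intro hmem <;> rcases List.mem_append.1 hmem with hmem | hmem
      · exact hfresh k (List.mem_cons_self) r (List.mem_cons_of_mem _ hr) hmem
      · simp only [List.mem_singleton] at hmem
        injection hmem with ha hb; exact hrk hb
      · exact hfresh r (List.mem_cons_of_mem _ hr) k (List.mem_cons_self) hmem
      · simp only [List.mem_singleton] at hmem
        injection hmem with ha hb; exact hrk ha
    have hrow := pv_row_items (pvScB cls) k ks (m.insert (k, k) 1) hnd0 hkks hksnd hfresh0
    have hitems' : (ks.foldl (pvRowIns (pvScB cls) k) (m.insert (k, k) (1 : Int))).items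
        = (m.items ++ [((k, k), (1 : Int))])
          ++ ks.flatMap (fun r => [((k, r), pvScB cls k r), ((r, k), pvScB cls k r)]) := by
      rw [hrow, hi0]
    have hfresh1 : ∀ c1 ∈ ks, ∀ c2 ∈ ks,
        (c1, c2) ∉ (ks.foldl (pvRowIns (pvScB cls) k) (m.insert (k, k) (1 : Int))).keys :=
      pv_fresh_after_row (pvScB cls) k ks m 1 hitems' hkks hfresh
    show (pvTriLoop cls ks (ks.foldl (pvRowIns (pvScB cls) k) (m.insert (k, k) 1))).items
      = m.items ++ pvL (pvScB cls) (k :: ks)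
    rw [ih hksnd _ (pv_row_nodup (pvScB cls) k ks _ hnd0) hfresh1, hitems']
    simp [pvL, hskk, List.append_assoc]

theorem pv_L_congr (scA scB : String → String → Int) :
    ∀ (ks : List String), (∀ a ∈ ks, ∀ b ∈ ks, scA a b = scB a b) → pvL scA ks = pvL scB ks := by
  intro ks
  induction ks with
  | nil => intro _; rfl
  | cons k ks ih =>
    intro h
    have hflat : ∀ l : List String, (∀ r ∈ l, scA k r = scB k r) →
        l.flatMap (fun r => [((k, r), scA k r), ((r, k), scA k r)])
          = l.flatMap (fun r => [((k, r), scB k r), ((r, k), scB k r)]) := by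
      intro l hl
      induction l with
      | nil => rfl
      | cons a t iht =>
        rw [List.flatMap_cons, List.flatMap_cons, hl a (List.mem_cons_self),
          iht (fun r hr => hl r (List.mem_cons_of_mem _ hr))]
    simp only [pvL]
    rw [h k (List.mem_cons_self) k (List.mem_cons_self),
      hflat ks (fun r hr => h k (List.mem_cons_self) r (List.mem_cons_of_mem _ hr)),
      ih (fun a ha b hb => h a (List.mem_cons_of_mem _ ha) b (List.mem_cons_of_mem _ hb))]

theorem pvClsVal_eq_iff (t1 t2 : String) :
    pvClsVal t1 = pvClsVal t2
      ↔ (t1 = t2 ∨ (t1 ∈ (["A", "C"] : List String) ∧ t2 ∈ (["A", "C"] : List String))) := by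
  have m1 : t1 ∈ (["A", "C"] : List String) ↔ (t1 = "A" ∨ t1 = "C") := by simp
  have m2 : t2 ∈ (["A", "C"] : List String) ↔ (t2 = "A" ∨ t2 = "C") := by simp
  unfold pvClsVal
  split_ifs with h1 h2 h2
  · simp only [m1, m2]
    constructor
    · intro _; exact Or.inr ⟨h1, h2⟩
    · intro _; trivial
  · simp only [m1, m2]
    constructor
    · intro h; exact absurd (Or.inl h.symm) h2
    · rintro (h | ⟨_, hh⟩)
      · exact absurd (h ▸ h1) h2
      · exact absurd hh h2
  · simp only [m1, m2]
    constructor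
    · intro h; exact absurd (Or.inl h) h1
    · rintro (h | ⟨hh, _⟩)
      · exact absurd (h.symm ▸ h2) h1
      · exact absurd hh h1
  · simp only [m1, m2]
    constructor
    · exact Or.inl
    · rintro (h | ⟨hh, _⟩)
      · exact h
      · exact absurd hh h1

theorem generate_identity_matrix_spec : Claim_equal_generate_identity_matrix := by
  intro nodetypes _hdom
  show generate_identity_matrix nodetypes = generate_identity_matrix_alt nodetypes
  have hk : (pvD nodetypes).keys.Nodup := PySem.Dict.nodup_keys_ofList nodetypes
  have hemptynd : (PySem.Dict.empty : PySem.Dict (String × String) Int).keys.Nodup :=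
    List.nodup_nil
  have hemptyfresh : ∀ c1 ∈ (pvD nodetypes).keys, ∀ c2 ∈ (pvD nodetypes).keys,
      (c1, c2) ∉ (PySem.Dict.empty : PySem.Dict (String × String) Int).keys := by
    intro c1 _ c2 _ h
    exact absurd h (List.not_mem_nil)
  -- symmetry of A's score
  have hsymA : ∀ a b, pvScA (pvD nodetypes) a b = pvScA (pvD nodetypes) b a := by
    intro a b
    unfold pvScA
    exact if_congr
      ⟨fun h => h.elim (fun h => Or.inl h.symm) (fun h => Or.inr ⟨h.2, h.1⟩),
       fun h => h.elim (fun h => Or.inl h.symm) (fun h => Or.inr ⟨h.2, h.1⟩)⟩ rfl rfl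
  -- class-table facts
  have hclsitems : (pvCls nodetypes).items
      = (pvD nodetypes).items.map (fun p => (p.1, pvClsVal p.2)) := by
    show ((pvD nodetypes).items.foldl (fun m p => m.insert p.1 (pvClsVal p.2))
      PySem.Dict.empty).items = _
    have h := PySem.Dict.items_foldl_insert_fresh (pvD nodetypes).items (fun p => p.1)
      (fun p => pvClsVal p.2) PySem.Dict.empty (fun a _ => by simp) hk
    rw [h]
    rfl
  have hclskeys : (pvCls nodetypes).keys = (pvD nodetypes).keys := by
    show (pvCls nodetypes).items.map Prod.fst = (pvD nodetypes).items.map Prod.fst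
    rw [hclsitems, List.map_map]
    rfl
  have hclsnd : (pvCls nodetypes).keys.Nodup := by rw [hclskeys]; exact hk
  have hgetd : ∀ c ∈ (pvD nodetypes).keys,
      (pvCls nodetypes).getD c "" = pvClsVal ((pvD nodetypes).getD c "") := by
    intro c hc
    have hc' : c ∈ (pvD nodetypes).items.map Prod.fst := hc
    rcases List.mem_map.1 hc' with ⟨⟨c0, v⟩, hp, hfst⟩
    have hc0 : c0 = c := hfst
    subst hc0
    have h1 : (pvD nodetypes).getD c0 "" = v := PySem.Dict.getD_of_mem_items _ hp hk ""
    have h2 : (pvCls nodetypes).getD c0 "" = pvClsVal v := by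
      refine PySem.Dict.getD_of_mem_items _ ?_ hclsnd ""
      rw [hclsitems]
      exact List.mem_map.2 ⟨(c0, v), hp, rfl⟩
    rw [h1, h2]
  -- the scores agree on keys
  have hsc : ∀ a ∈ (pvD nodetypes).keys, ∀ b ∈ (pvD nodetypes).keys,
      pvScA (pvD nodetypes) a b = pvScB (pvCls nodetypes) a b := by
    intro a ha b hb
    unfold pvScA pvScB
    rw [hgetd a ha, hgetd b hb]
    exact if_congr (pvClsVal_eq_iff _ _).symm rfl rfl
  -- A's loop body is pvRowIns pvScA
  have hfun : ∀ c1 : String,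
      (fun (submat2 : PySem.Dict (String × String) Int) char2 =>
        if (pvD nodetypes).getD c1 "" = (pvD nodetypes).getD char2 ""
            ∨ ((pvD nodetypes).getD c1 "" ∈ (["A", "C"] : List String)
              ∧ (pvD nodetypes).getD char2 "" ∈ (["A", "C"] : List String)) then
          (submat2.insert (c1, char2) 1).insert (char2, c1) 1
        else
          (submat2.insert (c1, char2) (-40)).insert (char2, c1) (-40))
      = pvRowIns (pvScA (pvD nodetypes)) c1 := by
    intro c1
    funext m2 c2
    simp only [pvRowIns, pvScA]
    split_ifs with h
    · rfl
    · rfl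
  have hfunouter :
      (fun (submat : PySem.Dict (String × String) Int) char1 =>
        (pvD nodetypes).keys.foldl
          (fun (submat2 : PySem.Dict (String × String) Int) char2 =>
            if (pvD nodetypes).getD char1 "" = (pvD nodetypes).getD char2 ""
                ∨ ((pvD nodetypes).getD char1 "" ∈ (["A", "C"] : List String)
                  ∧ (pvD nodetypes).getD char2 "" ∈ (["A", "C"] : List String)) then
              (submat2.insert (char1, char2) 1).insert (char2, char1) 1
            else
              (submat2.insert (char1, char2) (-40)).insert (char2, char1) (-40))
          submat)
      = (fun (submat : PySem.Dict (String × String) Int) char1 =>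
          (pvD nodetypes).keys.foldl (pvRowIns (pvScA (pvD nodetypes)) char1) submat) := by
    funext submat char1
    rw [hfun char1]
  have hA0 : generate_identity_matrix nodetypes
      = ((pvD nodetypes).keys.foldl
          (fun (submat : PySem.Dict (String × String) Int) char1 =>
            (pvD nodetypes).keys.foldl
              (fun (submat2 : PySem.Dict (String × String) Int) char2 =>
                if (pvD nodetypes).getD char1 "" = (pvD nodetypes).getD char2 ""
                    ∨ ((pvD nodetypes).getD char1 "" ∈ (["A", "C"] : List String)
                      ∧ (pvD nodetypes).getD char2 "" ∈ (["A", "C"] : List String)) then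
                  (submat2.insert (char1, char2) 1).insert (char2, char1) 1
                else
                  (submat2.insert (char1, char2) (-40)).insert (char2, char1) (-40))
              submat)
          PySem.Dict.empty).items.map (fun p => (p.1.1, p.1.2, p.2)) := rfl
  have hB0 : generate_identity_matrix_alt nodetypes
      = (pvTriLoop (pvCls nodetypes) (pvCls nodetypes).keys
          PySem.Dict.empty).items.map (fun p => (p.1.1, p.1.2, p.2)) := rfl
  have hAitems : ((pvD nodetypes).keys.foldl
      (fun (submat : PySem.Dict (String × String) Int) char1 =>
        (pvD nodetypes).keys.foldl (pvRowIns (pvScA (pvD nodetypes)) char1) submat)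
      PySem.Dict.empty).items = pvL (pvScA (pvD nodetypes)) (pvD nodetypes).keys := by
    rw [pv_sq_items (pvScA (pvD nodetypes)) hsymA (pvD nodetypes).keys hk
      PySem.Dict.empty hemptynd hemptyfresh]
    rfl
  have hBitems : (pvTriLoop (pvCls nodetypes) (pvCls nodetypes).keys PySem.Dict.empty).items
      = pvL (pvScB (pvCls nodetypes)) (pvD nodetypes).keys := by
    rw [hclskeys, pv_tri_items (pvCls nodetypes) (pvD nodetypes).keys hk
      PySem.Dict.empty hemptynd hemptyfresh]
    rfl
  rw [hA0, hB0, hfunouter, hAitems, hBitems,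
    pv_L_congr (pvScA (pvD nodetypes)) (pvScB (pvCls nodetypes)) (pvD nodetypes).keys hsc]
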